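-- pv_equiv track=rewrite | github.com/juhtam/matrix-hianyzasok | megoldas.py | volt_kevesebb_mint_5_hianyzas
-- ===== SOURCE A (Python) =====
-- def volt_kevesebb_mint_5_hianyzas(hianyzasok):
--     """Megvizsgálja, hogy volt-e ötnél kevesebb hiányzás."""
--     hianyzas_db = 0
--     for hianyzas in hianyzasok:
--         if hianyzas < 0:
--             raise ValueError("Hibás adat: negatív szám a hiányzások között.")
--         if hianyzas > 0:
--             hianyzas_db += 1
--     return hianyzas_db <= 5
-- ===== SOURCE B (Python) =====
-- def volt_kevesebb_mint_5_hianyzas(hianyzasok):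
--     """Megvizsgálja, hogy volt-e ötnél kevesebb hiányzás."""
--     rendezett = sorted(hianyzasok)
--     if rendezett and rendezett[0] < 0:
--         raise ValueError("Hibás adat: negatív szám a hiányzások között.")
--     return len(rendezett) <= 5 or rendezett[-6] <= 0
-- ===== Notes on version B (the rewrite author's own statement) =====
-- stated objective: alternative
-- what changed: Replaces A's counting loop by a sort-based order-statistic test: sort the list, validate by checking the minimum, and decide the answer by whether the 6th-largest element is <= 0 (no counter at all).
import Mathlib
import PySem

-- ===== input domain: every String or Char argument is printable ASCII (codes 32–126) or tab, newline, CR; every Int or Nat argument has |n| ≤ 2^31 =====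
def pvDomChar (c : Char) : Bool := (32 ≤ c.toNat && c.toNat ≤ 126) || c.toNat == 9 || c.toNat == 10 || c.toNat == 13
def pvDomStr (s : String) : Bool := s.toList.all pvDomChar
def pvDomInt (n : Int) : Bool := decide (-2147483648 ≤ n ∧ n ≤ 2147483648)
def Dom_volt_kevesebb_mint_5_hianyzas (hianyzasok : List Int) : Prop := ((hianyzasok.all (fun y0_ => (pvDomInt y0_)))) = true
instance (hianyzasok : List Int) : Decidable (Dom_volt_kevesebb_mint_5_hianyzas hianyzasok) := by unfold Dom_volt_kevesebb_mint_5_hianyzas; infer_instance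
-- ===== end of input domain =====

-- B replaces A's counting loop by a sort-based order-statistic test: sort, validate via the minimum, answer via the 6th-largest element; objective: alternative.


-- ===== PORT A =====
-- A's loop: accumulate hianyzas_db; the 'raise' branch is excluded by Pre_ (the branch
-- returns the accumulator unchanged there, a value never claimed about).
def pvLoopA : List Int → Int → Int
  | [], acc => acc
  | h :: t, acc =>
    if h < 0 then acc            -- raise ValueError: outside Pre_
    else if h > 0 then pvLoopA t (acc + 1)
    else pvLoopA t acc

def volt_kevesebb_mint_5_hianyzas (hianyzasok : List Int) : Bool :=
  decide (pvLoopA hianyzasok 0 ≤ 5)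

-- ===== PORT B =====
-- the body after 'rendezett = sorted(hianyzasok)'
def pvCheckB (rendezett : List Int) : Bool :=
  if decide (rendezett ≠ []) && decide (rendezett.headD 0 < 0) then
    false                        -- raise ValueError: outside Pre_
  else
    decide (rendezett.length ≤ 5) ||
      (match PySem.List.pyGet? rendezett (-6) with   -- rendezett[-6]
       | some v => decide (v ≤ 0)
       | none => false)          -- unreachable: length ≥ 6 here

def volt_kevesebb_mint_5_hianyzas_alt (hianyzasok : List Int) : Bool :=
  pvCheckB (PySem.List.sorted hianyzasok (fun x => x) false)

-- ===== PRECONDITION & SPEC =====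
-- Pre_ excludes exactly the inputs containing a negative element, on which Python A raises ValueError.
def Pre_volt_kevesebb_mint_5_hianyzas (hianyzasok : List Int) : Prop :=
  ∀ h ∈ hianyzasok, 0 ≤ h
instance (hianyzasok : List Int) : Decidable (Pre_volt_kevesebb_mint_5_hianyzas hianyzasok) := by unfold Pre_volt_kevesebb_mint_5_hianyzas; infer_instance

def pvWitness_volt_kevesebb_mint_5_hianyzas : List Int := [0, 1, 2, 0, 3]

def Spec_volt_kevesebb_mint_5_hianyzas (hianyzasok : List Int) (out : Bool) : Prop := out = volt_kevesebb_mint_5_hianyzas_alt hianyzasok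
instance (hianyzasok : List Int) (out : Bool) : Decidable (Spec_volt_kevesebb_mint_5_hianyzas hianyzasok out) := by unfold Spec_volt_kevesebb_mint_5_hianyzas; infer_instance

-- ===== CLAIM =====
def Claim_equal_volt_kevesebb_mint_5_hianyzas : Prop := ∀ (hianyzasok : List Int), Dom_volt_kevesebb_mint_5_hianyzas hianyzasok → Pre_volt_kevesebb_mint_5_hianyzas hianyzasok → Spec_volt_kevesebb_mint_5_hianyzas hianyzasok (volt_kevesebb_mint_5_hianyzas hianyzasok)

-- ===== LEMMAS AND PROOFS =====
-- A's loop counts the strictly positive elements when no element is negative.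
theorem pvLoopA_count (xs : List Int) (acc : Int) (hnn : ∀ h ∈ xs, 0 ≤ h) :
    pvLoopA xs acc = acc + ((xs.filter (fun h => decide (h > 0))).length : Int) := by
  induction xs generalizing acc with
  | nil => simp [pvLoopA]
  | cons h t ih =>
    have h0 : 0 ≤ h := hnn h (by simp)
    have ht : ∀ x ∈ t, 0 ≤ x := fun x hx => hnn x (by simp [hx])
    by_cases hp : h > 0
    · simp [pvLoopA, not_lt.mpr h0, hp, ih _ ht]
      ring
    · simp [pvLoopA, not_lt.mpr h0, hp, ih _ ht]

-- In a ≤-sorted list of length ≥ 6, at most 5 elements are positive iff the 6th-largest is ≤ 0.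
theorem count_pos_le_five_iff (r : List Int) (hp : r.Pairwise (· ≤ ·)) (h6 : 6 ≤ r.length) :
    ((r.filter (fun h => decide (h > 0))).length ≤ 5 ↔ r[r.length - 6]'(by omega) ≤ 0) := by
  have hmono := List.pairwise_iff_getElem.mp hp
  set p : Int → Bool := fun h => decide (h > 0) with hpdef
  constructor
  · -- contrapositive: if r[len-6] > 0 then the last 6 elements are positive
    intro hle
    by_contra hv
    rw [not_le] at hv
    have hsplit : (r.filter p).length
        = ((r.take (r.length - 6)).filter p).length + ((r.drop (r.length - 6)).filter p).length := by
      conv_lhs => rw [← List.take_append_drop (r.length - 6) r]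
      rw [List.filter_append, List.length_append]
    have hall : ∀ x ∈ r.drop (r.length - 6), p x = true := by
      intro x hx
      obtain ⟨i, hi, hxi⟩ := List.mem_iff_getElem.mp hx
      have hlen : (r.drop (r.length - 6)).length = 6 := by simp; omega
      rw [List.getElem_drop] at hxi
      have : r[r.length - 6]'(by omega) ≤ r[r.length - 6 + i]'(by rw [hlen] at hi; omega) := by
        rcases Nat.eq_zero_or_pos i with h0 | h0
        · subst h0; simp
        · exact hmono _ _ _ _ (by omega)
      subst hxi
      simp [hpdef]
      omega
    have hdrop : (r.drop (r.length - 6)).filter p = r.drop (r.length - 6) :=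
      List.filter_eq_self.mpr hall
    rw [hsplit, hdrop] at hle
    have : (r.drop (r.length - 6)).length = 6 := by simp; omega
    omega
  · -- if r[len-6] ≤ 0 then the first len-5 elements are ≤ 0
    intro hv
    have hsplit : (r.filter p).length
        = ((r.take (r.length - 5)).filter p).length + ((r.drop (r.length - 5)).filter p).length := by
      conv_lhs => rw [← List.take_append_drop (r.length - 5) r]
      rw [List.filter_append, List.length_append]
    have hnone : ∀ x ∈ r.take (r.length - 5), ¬ p x = true := by
      intro x hx
      obtain ⟨i, hi, hxi⟩ := List.mem_iff_getElem.mp hx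
      have hlen : (r.take (r.length - 5)).length = r.length - 5 := by rw [List.length_take]; omega
      rw [List.getElem_take] at hxi
      have hile : r[i]'(by rw [hlen] at hi; omega) ≤ r[r.length - 6]'(by omega) := by
        rcases Nat.lt_or_ge i (r.length - 6) with h0 | h0
        · exact hmono _ _ _ _ h0
        · have : i = r.length - 6 := by rw [hlen] at hi; omega
          subst this; simp
      subst hxi
      simp [hpdef]
      omega
    have htake : (r.take (r.length - 5)).filter p = [] := by
      rw [List.filter_eq_nil_iff]; exact hnone
    have hdlen : (r.drop (r.length - 5)).length = 5 := by simp; omega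
    have := List.length_filter_le p (r.drop (r.length - 5))
    rw [hsplit, htake] at *
    simp_all

-- ===== VERDICT =====
theorem volt_kevesebb_mint_5_hianyzas_spec : Claim_equal_volt_kevesebb_mint_5_hianyzas := by
  intro xs _ hpre
  unfold Spec_volt_kevesebb_mint_5_hianyzas volt_kevesebb_mint_5_hianyzas volt_kevesebb_mint_5_hianyzas_alt pvCheckB
  set r := PySem.List.sorted xs (fun x => x) false with hr
  have hperm : r.Perm xs := PySem.List.sorted_perm ..
  have hrnn : ∀ h ∈ r, 0 ≤ h := fun h hh => hpre h (hperm.mem_iff.mp hh)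
  have hguard : (decide (r ≠ []) && decide (r.headD 0 < 0)) = false := by
    cases hcr : r with
    | nil => simp
    | cons a t =>
      have : 0 ≤ a := hrnn a (by rw [hcr]; simp)
      simp [not_lt.mpr this]
  rw [hguard]
  simp only [Bool.false_eq_true, if_neg (by simp : ¬ False)]
  have hcnt : ((xs.filter (fun h => decide (h > 0))).length : Int)
      = ((r.filter (fun h => decide (h > 0))).length : Int) := by
    exact_mod_cast ((hperm.filter _).length_eq).symm
  rw [pvLoopA_count xs 0 hpre, zero_add, hcnt]
  rcases Nat.lt_or_ge r.length 6 with hlen | hlen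
  · have h5 : (r.filter (fun h => decide (h > 0))).length ≤ 5 := by
      have := List.length_filter_le (fun h => decide (h > 0)) r
      omega
    have : ((r.filter (fun h => decide (h > 0))).length : Int) ≤ 5 := by exact_mod_cast h5
    simp [this]
    omega
  · have hget : PySem.List.pyGet? r (-6) = r[r.length - 6]? :=
      PySem.List.pyGet?_neg_ofNat r 6 (by omega) (by omega)
    rw [hget, List.getElem?_eq_getElem (by omega)]
    have hkey := count_pos_le_five_iff r (PySem.List.sorted_pairwise ..) hlen
    have h5 : decide (r.length ≤ 5) = false := by simp; omega
    rw [h5]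
    simp only [Bool.false_or]
    rw [decide_eq_decide]
    have hcast : (((r.filter (fun h => decide (h > 0))).length : Int) ≤ 5)
        ↔ (r.filter (fun h => decide (h > 0))).length ≤ 5 := by exact_mod_cast Iff.rfl
    rw [hcast]
    exact hkey
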